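-- pv_equiv track=rewrite | github.com/thekevlau/interview_training | david_recur2.py | find_all_permutations
-- ===== SOURCE A (Python) =====
-- def find_all_permutations (input_string):
--     all_permutations = []
--     input_string = "".join(sorted(input_string))
--     for i, each_char in enumerate(input_string):
--         if len(input_string) > 1:
--             new_string = input_string[:i] + input_string[i+1:]
--             for permutation in find_all_permutations(new_string):
--                 new_permutation = each_char+permutation
--                 all_permutations.append(new_permutation)
--         else:
--             all_permutations.append(input_string)
--             return all_permutations
--     return all_permutations
-- ===== SOURCE B (Python) =====
-- def find_all_permutations(input_string):
--     chars = sorted(input_string)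
--     if not chars:
--         return []
--     # iterative level-wise expansion: each state is (prefix built so far, remaining chars)
--     states = [("", chars)]
--     for _ in range(len(chars)):
--         states = [(prefix + rest[i], rest[:i] + rest[i + 1:])
--                   for prefix, rest in states
--                   for i in range(len(rest))]
--     return [prefix for prefix, _ in states]
-- ===== Notes on version B (the rewrite author's own statement) =====
-- stated objective: alternative
-- what changed: A's per-character recursion, which re-sorts the string at every recursive call and builds results depth-first, is replaced by one initial sort followed by an iterative breadth-first expansion of (prefix, remaining-chars) states, one level per character.
import Mathlib
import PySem

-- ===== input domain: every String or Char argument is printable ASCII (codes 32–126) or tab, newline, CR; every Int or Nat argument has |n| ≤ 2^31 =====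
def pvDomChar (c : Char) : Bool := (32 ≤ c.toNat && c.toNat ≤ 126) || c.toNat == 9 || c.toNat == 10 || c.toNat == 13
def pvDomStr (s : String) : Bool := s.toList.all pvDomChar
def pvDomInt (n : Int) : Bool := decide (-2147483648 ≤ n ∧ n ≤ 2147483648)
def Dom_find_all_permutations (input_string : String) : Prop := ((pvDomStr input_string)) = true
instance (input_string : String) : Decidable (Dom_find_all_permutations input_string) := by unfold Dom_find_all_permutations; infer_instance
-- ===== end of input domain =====

-- B replaces A's per-character recursion (which re-sorts at every call) by a single sort
-- followed by an iterative level-wise expansion of (prefix, remaining-chars) states;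
-- objective: alternative (structurally different, same output including duplicate order).

-- ===== PORT A =====
-- literal port of A's recursion; Python strings are ported as List Char inside the
-- recursion (string slicing / concatenation become the PySem list operations).
def permA (s : List Char) : List String :=
  -- input_string = "".join(sorted(input_string))
  let t := PySem.List.sorted s (fun c => c) false
  if _ht : 1 < t.length then
    -- for i, each_char in enumerate(input_string): here len(input_string) > 1 holds on
    -- every iteration, so the else branch (early return) is never reached in this case
    (PySem.List.enumerate t).attach.foldl
      (fun acc ic =>
        acc ++ (permA (PySem.List.slice t none (some ic.1.1) ++
                       PySem.List.slice t (some (ic.1.1 + 1)) none)).map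
          (fun p => String.ofList (ic.1.2 :: p.toList)))
      []
  else
    -- len ≤ 1: with t = [] the loop body never runs (return []); otherwise the first
    -- iteration takes the else branch, appends the whole (single-char) string and returns
    if t = [] then [] else [String.ofList t]
termination_by s.length
decreasing_by
  obtain ⟨k, hk, hic⟩ := (PySem.List.mem_enumerate_iff _ _ _).mp ic.2
  have hlen : (PySem.List.sorted s (fun c => c) false).length = s.length :=
    PySem.List.length_sorted s _ false
  have h1 : ic.1.1 = ((k : Int)) := by rw [hic]; simp
  rw [h1]
  rw [show ((k : Int)) + 1 = (((k + 1 : Nat)) : Int) by push_cast; ring]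
  rw [PySem.List.slice_to_natCast, PySem.List.slice_from_natCast]
  have hk' : k < (PySem.List.sorted s (fun c => c) false).length := hk
  simp only [List.length_append, List.length_take, List.length_drop, Nat.min_def]
  split <;> omega

def find_all_permutations (input_string : String) : List String :=
  permA input_string.toList

-- ===== PORT B =====
-- one expansion level of Source B's comprehension: every i satisfies 0 ≤ i < len(rest),
-- so rest[i] is List.getD i and the slices rest[:i] / rest[i+1:] are take/drop (exact here).
def stepB (states : List (List Char × List Char)) : List (List Char × List Char) :=
  states.flatMap (fun pr =>
    (List.range pr.2.length).map (fun i =>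
      (pr.1 ++ [pr.2.getD i ' '], pr.2.take i ++ pr.2.drop (i + 1))))

def find_all_permutations_alt (input_string : String) : List String :=
  let chars := PySem.List.sorted input_string.toList (fun c => c) false
  if chars = [] then []
  else
    ((List.range chars.length).foldl (fun sts _ => stepB sts)
        [(([] : List Char), chars)]).map
      (fun pr => String.ofList pr.1)

-- ===== PRECONDITION & SPEC =====
def Spec_find_all_permutations (input_string : String) (out : List String) : Prop := out = find_all_permutations_alt input_string
instance (input_string : String) (out : List String) : Decidable (Spec_find_all_permutations input_string out) := by unfold Spec_find_all_permutations; infer_instance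

-- ===== CLAIM (what is proved, stated in full; the proofs are below) =====
def Claim_equal_find_all_permutations : Prop := ∀ (input_string : String), Dom_find_all_permutations input_string → Spec_find_all_permutations input_string (find_all_permutations input_string)

-- ===== LEMMAS AND PROOFS =====

-- reference generation: all index-selection permutations of a character list
def permsSel (r : List Char) : List (List Char) :=
  if _hr : r = [] then [[]]
  else (List.range r.length).attach.flatMap (fun i =>
    (permsSel (r.take i.1 ++ r.drop (i.1 + 1))).map (fun q => r.getD i.1 ' ' :: q))
termination_by r.length
decreasing_by
  have := List.mem_range.mp i.2
  simp only [List.length_append, List.length_take, List.length_drop]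
  omega

theorem permsSel_nil : permsSel [] = [[]] := by simp [permsSel]

theorem flatMap_attach {α β : Type} (l : List α) (f : α → List β) :
    l.attach.flatMap (fun i => f i.1) = l.flatMap f := by
  conv_rhs => rw [← List.attach_map_subtype_val l]
  rw [List.flatMap_map]

theorem flatten_map_singleton {α β : Type} (l : List α) (g : α → β) :
    (l.map (fun x => [g x])).flatten = l.map g := by
  induction l with
  | nil => rfl
  | cons a l ih => simp [ih]

theorem permsSel_ne_nil (r : List Char) (hr : r ≠ []) :
    permsSel r = (List.range r.length).flatMap (fun k =>
      (permsSel (r.take k ++ r.drop (k + 1))).map (fun q => r.getD k ' ' :: q)) := by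
  rw [permsSel]
  simp only [hr, dite_false]
  exact flatMap_attach (List.range r.length)
    (fun k => (permsSel (r.take k ++ r.drop (k + 1))).map (fun q => r.getD k ' ' :: q))

theorem erase_sublist (t : List Char) (k : Nat) (hk : k < t.length) :
    (t.take k ++ t.drop (k + 1)).Sublist t := by
  conv_rhs => rw [← List.take_append_drop k t]
  exact (List.drop_eq_getElem_cons hk ▸ (List.sublist_cons_self _ _)).append_left _

theorem permA_eq_permsSel : ∀ (n : Nat) (s : List Char), s.length ≤ n → s ≠ [] →
    permA s = (permsSel (PySem.List.sorted s (fun c => c) false)).map String.ofList := by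
  intro n
  induction n with
  | zero =>
    intro s hsn hs
    cases s with
    | nil => exact absurd rfl hs
    | cons a l => simp at hsn
  | succ n IH =>
    intro s hsn hs
    have htlen : (PySem.List.sorted s (fun c => c) false).length = s.length :=
      PySem.List.length_sorted s _ false
    have htne : PySem.List.sorted s (fun c => c) false ≠ [] := by
      rw [Ne, PySem.List.sorted_eq_nil_iff]; exact hs
    have htpw : (PySem.List.sorted s (fun c => c) false).Pairwise (fun a b => a ≤ b) :=
      PySem.List.sorted_pairwise s (fun c => c)
    unfold permA
    set t := PySem.List.sorted s (fun c => c) false with ht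
    by_cases h1 : 1 < t.length
    · rw [dif_pos h1]
      rw [List.foldl_attach (f := fun (acc : List String) (p : Int × Char) =>
        acc ++ (permA (PySem.List.slice t none (some p.1) ++
                       PySem.List.slice t (some (p.1 + 1)) none)).map
          (fun q => String.ofList (p.2 :: q.toList)))]
      rw [PySem.List.foldl_append_eq_flatMap, List.nil_append]
      rw [PySem.List.enumerate_eq_map_pyRange t ' ', PySem.List.pyRange_one, List.map_map,
          List.flatMap_map]
      rw [permsSel_ne_nil t htne, List.map_flatMap]
      have hlenlen : (PySem.List.len t - 0).toNat = t.length := by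
        simp [PySem.List.len]
      rw [hlenlen]
      apply List.flatMap_congr
      intro k hkmem
      have hk : k < t.length := List.mem_range.mp hkmem
      have hcast : ((Function.comp (fun j => (j, PySem.List.pyGetD t j ' '))
          (fun k : Nat => (0 : Int) + ↑k)) k) = (((k : Int)), t.getD k ' ') := by
        simp [Function.comp, PySem.List.pyGetD_natCast]
      rw [hcast]
      have h2 : ((k : Int)) + 1 = (((k + 1 : Nat)) : Int) := by push_cast; ring
      simp only
      rw [h2, PySem.List.slice_to_natCast, PySem.List.slice_from_natCast]
      have hu : (t.take k ++ t.drop (k + 1)).length = t.length - 1 := by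
        simp only [List.length_append, List.length_take, List.length_drop]; omega
      have hune : t.take k ++ t.drop (k + 1) ≠ [] := by
        intro hc
        rw [hc] at hu
        simp at hu; omega
      have hupw : (t.take k ++ t.drop (k + 1)).Pairwise (fun a b => a ≤ b) :=
        htpw.sublist (erase_sublist t k hk)
      rw [IH (t.take k ++ t.drop (k + 1)) (by omega) hune]
      rw [PySem.List.sorted_eq_self_of_pairwise _ _ hupw]
      rw [List.map_map, List.map_map]
      apply List.map_congr_left
      intro q _
      simp
    · -- t has length exactly 1
      rw [dif_neg h1, if_neg htne]
      have hlen1 : t.length = 1 := by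
        have : 1 ≤ t.length := List.length_pos_of_ne_nil htne
        omega
      obtain ⟨c, hc⟩ := List.length_eq_one_iff.mp hlen1
      rw [hc, permsSel_ne_nil [c] (by simp)]
      simp [permsSel_nil]

theorem stepB_mem_len (states : List (List Char × List Char)) (m : Nat)
    (h : ∀ pr ∈ states, pr.2.length = m + 1) :
    ∀ pr ∈ stepB states, pr.2.length = m := by
  intro pr hpr
  simp only [stepB, List.mem_flatMap, List.mem_map, List.mem_range] at hpr
  obtain ⟨q, hq, i, hi, hpr⟩ := hpr
  have := h q hq
  subst hpr
  simp only [List.length_append, List.length_take, List.length_drop]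
  omega

theorem levels_eq : ∀ (l : List Nat) (states : List (List Char × List Char)),
    (∀ pr ∈ states, pr.2.length = l.length) →
    (l.foldl (fun sts _ => stepB sts) states).map Prod.fst
      = states.flatMap (fun pr => (permsSel pr.2).map (fun q => pr.1 ++ q)) := by
  intro l
  induction l with
  | nil =>
    intro states h
    simp only [List.foldl_nil]
    rw [List.flatMap_congr (g := fun pr => [pr.1]) ?_]
    · rw [List.flatMap_def, flatten_map_singleton]
    · intro pr hpr
      have : pr.2 = [] := List.length_eq_zero_iff.mp (h pr hpr)
      simp [this, permsSel_nil]
  | cons a l IH =>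
    intro states h
    simp only [List.foldl_cons]
    rw [IH (stepB states) (stepB_mem_len states l.length (by simpa using h))]
    rw [stepB, List.flatMap_assoc]
    apply List.flatMap_congr
    intro pr hpr
    have hlen : pr.2.length = l.length + 1 := by simpa using h pr hpr
    have hne : pr.2 ≠ [] := by
      intro hc; rw [hc] at hlen; simp at hlen
    rw [List.flatMap_map, permsSel_ne_nil pr.2 hne, List.map_flatMap]
    apply List.flatMap_congr
    intro i _
    simp only [List.map_map]
    apply List.map_congr_left
    intro q _
    simp only [Function.comp, List.append_assoc, List.singleton_append]

-- ===== VERDICT (by name: the statement is the Claim_ definition above) =====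
theorem find_all_permutations_spec : Claim_equal_find_all_permutations := by
  intro s _
  unfold Spec_find_all_permutations find_all_permutations find_all_permutations_alt
  by_cases hnil : s.toList = []
  · have hsort : PySem.List.sorted s.toList (fun c => c) false = [] :=
      (PySem.List.sorted_eq_nil_iff _ _ _).mpr hnil
    unfold permA
    simp [hsort]

  · have hsort : PySem.List.sorted s.toList (fun c => c) false ≠ [] := by
      rw [Ne, PySem.List.sorted_eq_nil_iff]; exact hnil
    simp only [hsort, if_false]
    rw [permA_eq_permsSel s.toList.length s.toList le_rfl hnil]
    set t := PySem.List.sorted s.toList (fun c => c) false with ht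
    have hlev := levels_eq (List.range t.length) [(([] : List Char), t)]
      (by intro pr hpr; simp at hpr; simp [hpr, List.length_range])
    have : ((List.range t.length).foldl (fun sts _ => stepB sts)
        [(([] : List Char), t)]).map (fun pr => String.ofList pr.1)
        = (((List.range t.length).foldl (fun sts _ => stepB sts)
        [(([] : List Char), t)]).map Prod.fst).map String.ofList := by
      rw [List.map_map]; rfl
    rw [this, hlev]
    simp [List.flatMap]
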